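-- pv_equiv track=rewrite | github.com/TanhHolland/Python | PY01039 - KIỂM TRA SỐ ĐẸP.py | check
-- ===== SOURCE A (Python) =====
-- def check(s) :
--     i = 0
--     k = s[i]
--     j = 1
--     t = s[j]
--     n = len(s)
--     while i < n :
--         if s[i] != k: return False
--         i += 2
--     while j < n :
--         if s[j] != t: return False
--         j += 2
--     if(k == t ): return False
--     return True
-- ===== SOURCE B (Python) =====
-- def check(s):
--     for i in range(2, len(s)):
--         if s[i] != s[i - 2]:
--             return False
--     return s[0] != s[1]
-- ===== Notes on version B (the rewrite author's own statement) =====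
-- stated objective: simpler
-- what changed: Replaces A's two anchored parity passes (each comparing to a fixed first/second character) by one local-consistency pass comparing each character to the one two positions back, finishing with s[0] != s[1].
import Mathlib
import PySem

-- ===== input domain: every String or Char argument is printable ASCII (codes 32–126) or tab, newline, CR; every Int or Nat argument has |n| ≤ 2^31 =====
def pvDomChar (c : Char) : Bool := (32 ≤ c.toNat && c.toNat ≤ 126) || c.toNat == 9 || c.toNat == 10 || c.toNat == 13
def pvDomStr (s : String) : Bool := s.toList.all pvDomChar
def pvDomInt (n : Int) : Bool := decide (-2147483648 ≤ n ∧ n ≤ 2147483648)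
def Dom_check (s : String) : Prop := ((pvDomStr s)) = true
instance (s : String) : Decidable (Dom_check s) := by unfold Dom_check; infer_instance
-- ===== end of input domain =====

-- B replaces A's two anchored parity passes by one local pass comparing s[i] with s[i-2] (objective: simpler).

-- ===== PORT A =====
-- A's while-loop 'while i < n: if s[i] != k: return False; i += 2', started at i=0 with k=s[0]
-- and again at j=1 with t=s[1]
def checkLoop (cs : List Char) (k : Char) (i : Nat) : Bool :=
  if h : i < cs.length then
    if cs[i] ≠ k then false else checkLoop cs k (i + 2)
  else true
termination_by cs.length - i

def check (s : String) : Bool :=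
  let cs := s.toList
  match cs[0]?, cs[1]? with            -- k = s[0], t = s[1]; none = IndexError, excluded by Pre_
  | some k, some t =>
      if checkLoop cs k 0 then
        if checkLoop cs t 1 then
          if k = t then false else true
        else false
      else false
  | _, _ => false

-- ===== PORT B =====
-- B's for-loop 'for i in range(2, len(s)): if s[i] != s[i-2]: return False'
def altLoop (cs : List Char) (i : Nat) : Bool :=
  if h : i < cs.length then
    if cs[i] ≠ cs[i - 2]! then false else altLoop cs (i + 1)
  else true
termination_by cs.length - i

def check_alt (s : String) : Bool :=
  let cs := s.toList
  if altLoop cs 2 then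
    match cs with                      -- final 's[0] != s[1]'; length < 2 = IndexError, excluded by Pre_
    | a :: b :: _ => decide (a ≠ b)
    | _ => false
  else false

-- ===== PRECONDITION & SPEC =====
-- Pre_ excludes strings of length < 2, on which A (and B alike) raises IndexError reading s[0]/s[1].
def Pre_check (s : String) : Prop := 2 ≤ s.toList.length
instance (s : String) : Decidable (Pre_check s) := by unfold Pre_check; infer_instance
def pvWitness_check : String := "abab"
def Spec_check (s : String) (out : Bool) : Prop := out = check_alt s
instance (s : String) (out : Bool) : Decidable (Spec_check s out) := by unfold Spec_check; infer_instance

-- ===== CLAIM (what is proved, stated in full; the proofs are below) =====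
def Claim_equal_check : Prop := ∀ (s : String), Dom_check s → Pre_check s → Spec_check s (check s)

-- ===== LEMMAS AND PROOFS =====

-- A's stride-2 scan succeeds iff every visited position holds k
theorem checkLoop_iff (cs : List Char) (k : Char) (i : Nat) :
    checkLoop cs k i = true ↔ ∀ m, i + 2 * m < cs.length → cs[i + 2 * m]! = k := by
  fun_induction checkLoop cs k i with
  | case1 i h hne =>
      constructor
      · intro hc; cases hc
      · intro hall
        have := hall 0 (by omega)
        simp only [Nat.mul_zero, Nat.add_zero] at this
        rw [getElem!_pos cs _ h] at this
        exact absurd this (by simpa using hne)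
  | case2 i h heq ih =>
      rw [ih]
      constructor
      · intro hall m hm
        cases m with
        | zero =>
            simp only [Nat.mul_zero, Nat.add_zero]
            rw [getElem!_pos cs _ h]
            simpa using heq
        | succ m' =>
            have := hall m' (by omega)
            have e : i + 2 + 2 * m' = i + 2 * (m' + 1) := by omega
            rw [e] at this; exact this
      · intro hall m hm
        have := hall (m + 1) (by omega)
        have e : i + 2 + 2 * m = i + 2 * (m + 1) := by omega
        rw [e]; exact this
  | case3 i h =>
      constructor
      · intro _ m hm; omega
      · intro _; trivial

-- B's local scan succeeds iff every position ≥ i equals the one two back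
theorem altLoop_iff (cs : List Char) (i : Nat) :
    altLoop cs i = true ↔ ∀ j, i ≤ j → j < cs.length → cs[j]! = cs[j - 2]! := by
  fun_induction altLoop cs i with
  | case1 i h hne =>
      constructor
      · intro hc; cases hc
      · intro hall
        have := hall i le_rfl h
        rw [getElem!_pos cs _ h] at this
        exact absurd this (by simpa using hne)
  | case2 i h heq ih =>
      rw [ih]
      constructor
      · intro hall j hij hj
        rcases Nat.eq_or_lt_of_le hij with rfl | hlt
        · rw [getElem!_pos cs _ h]; simpa using heq
        · exact hall j hlt hj
      · intro hall j hij hj; exact hall j (by omega) hj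
  | case3 i h =>
      constructor
      · intro _ j hij hj; omega
      · intro _; trivial

-- local consistency propagates along a stride-2 chain
theorem steps (cs : List Char)
    (H : ∀ j, 2 ≤ j → j < cs.length → cs[j]! = cs[j - 2]!)
    (i m : Nat) (hm : i + 2 * m < cs.length) : cs[i + 2 * m]! = cs[i]! := by
  induction m with
  | zero => simp
  | succ m ih =>
      have h1 := H (i + 2 * (m + 1)) (by omega) (by omega)
      have e : i + 2 * (m + 1) - 2 = i + 2 * m := by omega
      rw [e] at h1
      rw [h1]; exact ih (by omega)

-- B's single pass equals the conjunction of A's two anchored passes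
theorem key (a b : Char) (r : List Char) :
    altLoop (a :: b :: r) 2 = (checkLoop (a :: b :: r) a 0 && checkLoop (a :: b :: r) b 1) := by
  set cs := a :: b :: r with hcs
  have h0 : cs[0]! = a := by simp [hcs]
  have h1 : cs[1]! = b := by simp [hcs]
  rw [← Bool.coe_iff_coe]
  rw [altLoop_iff, Bool.and_eq_true, checkLoop_iff, checkLoop_iff]
  constructor
  · intro H
    refine ⟨fun m hm => ?_, fun m hm => ?_⟩
    · rw [steps cs H 0 m hm, h0]
    · rw [steps cs H 1 m hm, h1]
  · rintro ⟨Ha, Hb⟩ j hj hjn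
    rcases Nat.even_or_odd j with ⟨m, hm⟩ | ⟨m, hm⟩
    · have e1 : j = 0 + 2 * m := by omega
      rw [e1]
      have e2 : 0 + 2 * m - 2 = 0 + 2 * (m - 1) := by omega
      rw [e2, Ha m (by omega), Ha (m - 1) (by omega)]
    · have e1 : j = 1 + 2 * m := by omega
      rw [e1]
      have e2 : 1 + 2 * m - 2 = 1 + 2 * (m - 1) := by omega
      rw [e2, Hb m (by omega), Hb (m - 1) (by omega)]

-- ===== VERDICT (by name: the statement is the Claim_ definition above) =====
theorem check_spec : Claim_equal_check := by
  intro s _ hpre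
  unfold Spec_check check check_alt
  unfold Pre_check at hpre
  rcases hcs : s.toList with _ | ⟨a, tl⟩
  · rw [hcs] at hpre; simp at hpre
  · rcases tl with _ | ⟨b, r⟩
    · rw [hcs] at hpre; simp at hpre
    · simp only [List.getElem?_cons_zero, List.getElem?_cons_succ, key]
      cases hA : checkLoop (a :: b :: r) a 0 <;>
        cases hB : checkLoop (a :: b :: r) b 1 <;>
          by_cases h : a = b <;> simp [h]
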